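-- pv_equiv track=rewrite | github.com/AninditaGuha98/Encrypt-and-Decrypt-using-GUI. | cipher_func.py | OTP_decrypt
-- ===== SOURCE A (Python) =====
-- import string
--
-- otp= string.ascii_lowercase
--
-- one_time_pad = list(otp)
--
-- def OTP_decrypt(ciphertext, key):
--     if ciphertext == '' or key == '':
--         return ''
--     char_ID = otp.index(ciphertext[0])
--     key_ID = one_time_pad.index(key[0])
--
--     cipher = (char_ID - key_ID) % len(one_time_pad)
--     char = otp[cipher]
--
--     return char + OTP_decrypt(ciphertext[1:], key[1:])
-- ===== SOURCE B (Python) =====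
-- # B: single pass over zip(ciphertext, key) instead of string-slicing recursion.
-- import string
--
-- otp = string.ascii_lowercase
-- one_time_pad = list(otp)
--
-- def OTP_decrypt(ciphertext, key):
--     return ''.join(
--         otp[(otp.index(c) - one_time_pad.index(k)) % len(one_time_pad)]
--         for c, k in zip(ciphertext, key)
--     )
-- ===== Notes on version B (the rewrite author's own statement) =====
-- stated objective: idiomatic
-- what changed: Replaced the string-slicing recursion with one iterative pass: a join over a generator on zip(ciphertext, key), which naturally stops at the shorter string like the recursion's base cases.
import Mathlib
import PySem

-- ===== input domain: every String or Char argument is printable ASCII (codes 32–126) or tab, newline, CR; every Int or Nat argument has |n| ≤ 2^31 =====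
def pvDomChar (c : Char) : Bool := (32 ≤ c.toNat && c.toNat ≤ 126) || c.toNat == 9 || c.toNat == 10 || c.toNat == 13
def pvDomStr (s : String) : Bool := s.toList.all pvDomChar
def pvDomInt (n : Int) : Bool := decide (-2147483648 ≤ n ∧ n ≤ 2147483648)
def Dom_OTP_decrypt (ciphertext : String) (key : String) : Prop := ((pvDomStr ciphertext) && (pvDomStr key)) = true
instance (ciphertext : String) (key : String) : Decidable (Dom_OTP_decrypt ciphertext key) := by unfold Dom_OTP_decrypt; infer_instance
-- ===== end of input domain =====

-- B changes only the decomposition (one zip pass instead of slicing recursion); return values agree wherever A returns.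

-- ===== PORT A =====
-- otp = string.ascii_lowercase; one_time_pad = list(otp)
def pvOtp : List Char := "abcdefghijklmnopqrstuvwxyz".toList

-- the recursion of A, on the character lists (ciphertext[1:] = tail);
-- .index raises ValueError on a char not in otp: Pre_ excludes those inputs,
-- the port uses the total .getD 0 form there.
def OTP_decrypt_go : List Char → List Char → List Char
  | [], _ => []
  | _, [] => []
  | c :: cs, k :: ks =>
      let charID : Int := ((PySem.List.index? pvOtp c).getD 0 : Nat)
      let keyID : Int := ((PySem.List.index? pvOtp k).getD 0 : Nat)
      let cipher : Int := PySem.Int.mod (charID - keyID) (PySem.List.len pvOtp)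
      PySem.List.pyGetD pvOtp cipher ' ' :: OTP_decrypt_go cs ks

def OTP_decrypt (ciphertext : String) (key : String) : String :=
  String.mk (OTP_decrypt_go ciphertext.toList key.toList)

-- ===== PORT B =====
def OTP_decrypt_alt (ciphertext : String) (key : String) : String :=
  String.mk ((ciphertext.toList.zip key.toList).map (fun p =>
    PySem.List.pyGetD pvOtp
      (PySem.Int.mod (((PySem.List.index? pvOtp p.1).getD 0 : Nat)
        - ((PySem.List.index? pvOtp p.2).getD 0 : Nat)) (PySem.List.len pvOtp)) ' '))

-- ===== PRECONDITION & SPEC =====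
-- Pre_: every character compared (i.e. within the first min(len,len) positions) is a
-- lowercase letter; elsewhere Python's .index raises ValueError.
def Pre_OTP_decrypt (ciphertext : String) (key : String) : Prop :=
  ∀ p ∈ ciphertext.toList.zip key.toList, p.1 ∈ pvOtp ∧ p.2 ∈ pvOtp
instance (ciphertext : String) (key : String) : Decidable (Pre_OTP_decrypt ciphertext key) := by
  unfold Pre_OTP_decrypt; infer_instance

def pvWitness_OTP_decrypt : String × String := ("ifmmp", "aaaaa")

def Spec_OTP_decrypt (ciphertext : String) (key : String) (out : String) : Prop := out = OTP_decrypt_alt ciphertext key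
instance (ciphertext : String) (key : String) (out : String) : Decidable (Spec_OTP_decrypt ciphertext key out) := by unfold Spec_OTP_decrypt; infer_instance

-- ===== CLAIM (what is proved, stated in full; the proofs are below) =====
def Claim_equal_OTP_decrypt : Prop := ∀ (ciphertext : String) (key : String), Dom_OTP_decrypt ciphertext key → Pre_OTP_decrypt ciphertext key → Spec_OTP_decrypt ciphertext key (OTP_decrypt ciphertext key)

-- ===== LEMMAS AND PROOFS =====
lemma OTP_decrypt_go_eq_map_zip (cs ks : List Char) :
    OTP_decrypt_go cs ks = (cs.zip ks).map (fun p =>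
      PySem.List.pyGetD pvOtp
        (PySem.Int.mod (((PySem.List.index? pvOtp p.1).getD 0 : Nat)
          - ((PySem.List.index? pvOtp p.2).getD 0 : Nat)) (PySem.List.len pvOtp)) ' ') := by
  induction cs generalizing ks with
  | nil => simp [OTP_decrypt_go]
  | cons c cs ih =>
    cases ks with
    | nil => simp [OTP_decrypt_go]
    | cons k ks => simp [OTP_decrypt_go, ih]

-- ===== VERDICT (by name: the statement is the Claim_ definition above) =====
theorem OTP_decrypt_spec : Claim_equal_OTP_decrypt := by
  intro ciphertext key _ _
  unfold Spec_OTP_decrypt OTP_decrypt OTP_decrypt_alt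
  rw [OTP_decrypt_go_eq_map_zip]
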